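-- pv_equiv track=rewrite | github.com/paiml/depyler | examples/hard_list_comprehensions.py | drop_while_negative
-- ===== SOURCE A (Python) =====
-- def drop_while_negative(nums: list[int]) -> list[int]:
--     """Drop elements from the front while they are negative."""
--     result: list[int] = []
--     dropping: bool = True
--     for x in nums:
--         if dropping and x < 0:
--             continue
--         dropping = False
--         result.append(x)
--     return result
-- ===== SOURCE B (Python) =====
-- def drop_while_negative(nums: list[int]) -> list[int]:
--     """Drop elements from the front while they are negative."""
--     i = next((j for j, x in enumerate(nums) if x >= 0), len(nums))
--     return nums[i:]
-- ===== Notes on version B (the rewrite author's own statement) =====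
-- stated objective: simpler
-- what changed: Replaces A's flag-gated per-element append loop by a two-phase 'find the first non-negative index, then return one slice'.
import Mathlib
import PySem

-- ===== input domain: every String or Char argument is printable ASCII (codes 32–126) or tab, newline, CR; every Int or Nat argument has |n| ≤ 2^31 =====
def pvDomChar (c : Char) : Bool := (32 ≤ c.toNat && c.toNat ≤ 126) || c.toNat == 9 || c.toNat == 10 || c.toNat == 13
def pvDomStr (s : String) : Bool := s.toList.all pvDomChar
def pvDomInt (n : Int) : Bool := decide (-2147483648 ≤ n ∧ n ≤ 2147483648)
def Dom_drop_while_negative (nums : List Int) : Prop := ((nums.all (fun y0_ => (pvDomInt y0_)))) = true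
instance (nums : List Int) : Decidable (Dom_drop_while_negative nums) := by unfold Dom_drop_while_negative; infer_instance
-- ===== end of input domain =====

-- ===== PORT A =====
-- one line: B computes the boundary index of the first non-negative element and returns one slice, instead of A's flag-gated append loop; same values everywhere.
def drop_while_negative (nums : List Int) : List Int :=
  (nums.foldl
    (fun (s : Bool × List Int) x =>
      if s.1 && decide (x < 0) then s
      else (false, s.2 ++ [x]))
    (true, [])).2

-- ===== PORT B =====
-- helper: index of first element ≥ 0 (length if none), as in Source B's next(...)
def firstNonNegIdx : List Int → Nat
  | [] => 0
  | x :: xs => if x ≥ 0 then 0 else firstNonNegIdx xs + 1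

def drop_while_negative_alt (nums : List Int) : List Int :=
  nums.drop (firstNonNegIdx nums)

-- ===== PRECONDITION & SPEC =====
def Spec_drop_while_negative (nums : List Int) (out : List Int) : Prop := out = drop_while_negative_alt nums
instance (nums : List Int) (out : List Int) : Decidable (Spec_drop_while_negative nums out) := by unfold Spec_drop_while_negative; infer_instance

-- ===== CLAIM (what is proved, stated in full; the proofs are below) =====
def Claim_equal_drop_while_negative : Prop := ∀ (nums : List Int), Dom_drop_while_negative nums → Spec_drop_while_negative nums (drop_while_negative nums)

-- ===== LEMMAS AND PROOFS =====

-- ===== VERDICT (by name: the statement is the Claim_ definition above) =====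
-- once dropping is false, the fold appends every remaining element
theorem foldA_false (l : List Int) (acc : List Int) :
    (l.foldl
      (fun (s : Bool × List Int) x =>
        if s.1 && decide (x < 0) then s
        else (false, s.2 ++ [x]))
      (false, acc)).2 = acc ++ l := by
  induction l generalizing acc with
  | nil => simp
  | cons x xs ih => simpa [List.foldl, List.append_assoc] using ih (acc ++ [x])

theorem main_eq (nums : List Int) :
    drop_while_negative nums = drop_while_negative_alt nums := by
  induction nums with
  | nil => rfl
  | cons x xs ih =>
    by_cases hx : x < 0
    · have : ¬ x ≥ 0 := by omega
      simp [drop_while_negative, drop_while_negative_alt, firstNonNegIdx, List.foldl, hx, this] at *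
      exact ih
    · have hx' : x ≥ 0 := by omega
      simp [drop_while_negative, drop_while_negative_alt, firstNonNegIdx, List.foldl, hx, hx']
      simpa using foldA_false xs [x]

theorem drop_while_negative_spec : Claim_equal_drop_while_negative := by
  intro nums _
  exact main_eq nums
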